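-- pv_equiv track=rewrite | github.com/ZihengXinBU/Graph_theory | read_online.py | group_cycles
-- ===== SOURCE A (Python) =====
-- def group_cycles(cycles):
--     # Initialize a list to store groups of cycles
--     cycle_groups = []
--
--     # Iterate over each cycle in the list of cycles
--     for cycle in cycles:
--         # Check if the cycle shares edges with any existing cycle group
--         group_found = False
--         for group in cycle_groups:
--             if set(cycle).intersection(group):
--                 group_found = True
--                 group.update(cycle)
--                 break
--
--         # If the cycle does not share edges with any existing group, create a new group
--         if not group_found:
--             cycle_groups.append(set(cycle))
--
--     # Convert the set of edges in each group to a sorted list and return the list of groups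
--     return [sorted(list(group)) for group in cycle_groups]
-- ===== SOURCE B (Python) =====
-- def group_cycles(cycles):
--     # Same grouping as A, but instead of scanning every existing group per cycle,
--     # keep owner: vertex -> smallest index of a group currently containing it.
--     # The first group intersecting a cycle is exactly min(owner[v] for mapped v).
--     groups = []   # list of sets of vertices
--     owner = {}    # vertex -> smallest index of a group containing it
--     for cycle in cycles:
--         hits = [owner[v] for v in cycle if v in owner]
--         if hits:
--             g = min(hits)
--             groups[g].update(cycle)
--         else:
--             g = len(groups)
--             groups.append(set(cycle))
--         for v in cycle:
--             owner[v] = g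
--     return [sorted(group) for group in groups]
-- ===== Notes on version B (the rewrite author's own statement) =====
-- stated objective: alternative
-- what changed: Replaces A's per-cycle scan over all existing groups (each tested by set intersection) with a vertex-to-first-group-index dictionary: the first intersecting group is the minimum index the cycle's vertices map to, found in one pass over the cycle.
import Mathlib
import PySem

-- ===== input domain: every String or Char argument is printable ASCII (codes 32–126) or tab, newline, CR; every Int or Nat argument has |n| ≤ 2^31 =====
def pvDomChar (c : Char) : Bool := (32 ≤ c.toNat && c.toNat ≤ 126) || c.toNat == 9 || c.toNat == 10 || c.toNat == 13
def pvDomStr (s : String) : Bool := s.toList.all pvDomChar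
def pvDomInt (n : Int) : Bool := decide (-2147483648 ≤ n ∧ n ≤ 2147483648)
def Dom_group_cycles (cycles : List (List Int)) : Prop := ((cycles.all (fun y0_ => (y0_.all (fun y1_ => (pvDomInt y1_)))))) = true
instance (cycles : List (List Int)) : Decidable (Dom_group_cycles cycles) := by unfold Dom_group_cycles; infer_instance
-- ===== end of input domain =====

-- B replaces A's per-cycle intersection scan over all existing groups by a
-- vertex→first-group-index map, taking the minimum index hit by the cycle's vertices.

-- ===== PORT A =====
-- inner loop 'for group in cycle_groups: if set(cycle).intersection(group): group.update(cycle); break'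
def pvInsertA (cycle : List Int) : List (PySem.Set Int) → List (PySem.Set Int) × Bool
  | [] => ([], false)
  | g :: rest =>
    if PySem.Set.inter (PySem.Set.ofList cycle) g ≠ [] then
      (PySem.Set.update g cycle :: rest, true)
    else
      let r := pvInsertA cycle rest
      (g :: r.1, r.2)

def group_cycles (cycles : List (List Int)) : List (List Int) :=
  (cycles.foldl (fun cycle_groups cycle =>
      let r := pvInsertA cycle cycle_groups
      if r.2 then r.1 else r.1 ++ [PySem.Set.ofList cycle]) []).map
    (fun group => PySem.List.sorted group (fun x => x) false)

-- ===== PORT B =====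
-- one step of Source B's loop; state = (groups, owner).  Values stored in owner are list
-- indices, hence always nonnegative, so '.toNat' on them is exact Python indexing.
def pvStepB (st : List (PySem.Set Int) × PySem.Dict Int Int) (cycle : List Int) :
    List (PySem.Set Int) × PySem.Dict Int Int :=
  let hits := cycle.filterMap (fun v => st.2.get? v)
  match PySem.List.min? hits (fun x => x) with
  | some g =>
      (st.1.modify g.toNat (fun s => PySem.Set.update s cycle),
       cycle.foldl (fun d v => d.insert v g) st.2)
  | none =>
      let g : Int := st.1.length
      (st.1 ++ [PySem.Set.ofList cycle],
       cycle.foldl (fun d v => d.insert v g) st.2)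

def group_cycles_alt (cycles : List (List Int)) : List (List Int) :=
  ((cycles.foldl pvStepB ([], PySem.Dict.empty)).1).map
    (fun group => PySem.List.sorted group (fun x => x) false)

-- ===== PRECONDITION & SPEC =====
def Spec_group_cycles (cycles : List (List Int)) (out : List (List Int)) : Prop := out = group_cycles_alt cycles
instance (cycles : List (List Int)) (out : List (List Int)) : Decidable (Spec_group_cycles cycles out) := by unfold Spec_group_cycles; infer_instance

-- ===== CLAIM (what is proved, stated in full; the proofs are below) =====
def Claim_equal_group_cycles : Prop := ∀ (cycles : List (List Int)), Dom_group_cycles cycles → Spec_group_cycles cycles (group_cycles cycles)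

-- ===== LEMMAS AND PROOFS =====

-- the Bool predicate "cycle shares a vertex with group g"
def pvHit (cycle : List Int) (g : PySem.Set Int) : Bool := cycle.any (fun v => decide (v ∈ g))

-- first index of a group containing v
def pvFirstIdx? (groups : List (PySem.Set Int)) (v : Int) : Option Nat :=
  groups.findIdx? (fun g => decide (v ∈ g))

-- the invariant tying B's owner map to A's groups list
def pvInv (groups : List (PySem.Set Int)) (owner : PySem.Dict Int Int) : Prop :=
  ∀ v : Int, owner.get? v = (pvFirstIdx? groups v).map Int.ofNat

-- A's truthiness test "set(cycle).intersection(group)" is pvHit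
lemma pvHit_eq (cycle : List Int) (g : PySem.Set Int) :
    (decide (PySem.Set.inter (PySem.Set.ofList cycle) g ≠ [])) = pvHit cycle g := by
  rw [pvHit, Bool.eq_iff_iff, decide_eq_true_eq, List.any_eq_true, Ne, ← List.isEmpty_iff,
      Bool.not_eq_true, List.isEmpty_eq_false_iff_exists_mem]
  constructor
  · rintro ⟨x, hx⟩
    rw [PySem.Set.mem_inter, PySem.Set.mem_ofList] at hx
    exact ⟨x, hx.1, decide_eq_true hx.2⟩
  · rintro ⟨v, hv, hvg⟩
    exact ⟨v, (PySem.Set.mem_inter _ _ _).mpr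
      ⟨(PySem.Set.mem_ofList _ _).mpr hv, of_decide_eq_true hvg⟩⟩

-- A's inner loop = find the first hit group and update it in place
lemma pvInsertA_eq (cycle : List Int) (groups : List (PySem.Set Int)) :
    pvInsertA cycle groups =
      match groups.findIdx? (pvHit cycle) with
      | some i => (groups.modify i (fun s => PySem.Set.update s cycle), true)
      | none => (groups, false) := by
  induction groups with
  | nil => rfl
  | cons g rest ih =>
    rw [pvInsertA, List.findIdx?_cons]
    by_cases h : pvHit cycle g = true
    · rw [if_pos (of_decide_eq_true ((pvHit_eq cycle g).trans h)), h]
      simp [List.modify]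
    · rw [if_neg (fun hc => h ((pvHit_eq cycle g).symm.trans (decide_eq_true hc))),
          Bool.not_eq_true] at *
      rw [h, ih]
      cases hf : rest.findIdx? (pvHit cycle) <;> simp [List.modify]

-- lookup through B's owner-writing loop
lemma pvOwner_get (cycle : List Int) (g : Int) (d : PySem.Dict Int Int) (v : Int) :
    (cycle.foldl (fun d x => d.insert x g) d).get? v =
      if v ∈ cycle then some g else d.get? v := by
  induction cycle generalizing d with
  | nil => simp
  | cons x xs ih =>
    rw [List.foldl_cons, ih]
    by_cases hv : v ∈ xs <;> by_cases hx : v = x <;>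
      simp [hv, hx, PySem.Dict.get?_insert]

-- findIdx? only looks at the predicate's values along the list
lemma pvFindIdx?_ext {α β : Type} {p : α → Bool} {q : β → Bool} :
    ∀ {xs : List α} {ys : List β} (hlen : xs.length = ys.length),
    (∀ k (hk : k < xs.length), p xs[k] = q (ys[k]'(hlen ▸ hk))) →
    xs.findIdx? p = ys.findIdx? q := by
  intro xs
  induction xs with
  | nil =>
    intro ys hlen _
    cases ys with
    | nil => rfl
    | cons y ys => simp at hlen
  | cons x xs ih =>
    intro ys hlen hpt
    cases ys with
    | nil => simp at hlen
    | cons y ys =>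
      rw [List.findIdx?_cons, List.findIdx?_cons,
          show p x = q y from hpt 0 (by simp),
          ih (by simpa using hlen)
            (fun k hk => by simpa using hpt (k + 1) (by simpa using Nat.succ_lt_succ hk))]

-- a vertex of a hit group pins the first hit index from below and above
lemma pvFirstIdx_of_mem (groups : List (PySem.Set Int)) (v : Int) (j : Nat)
    (hj : j < groups.length) (hvj : v ∈ groups[j]) :
    ∃ i ≤ j, pvFirstIdx? groups v = some i := by
  cases hfi : pvFirstIdx? groups v with
  | none =>
    exact absurd (decide_eq_true hvj)
      (Bool.not_eq_true _ ▸ (List.findIdx?_eq_none_iff.mp hfi _ (List.getElem_mem hj)))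
  | some i =>
    obtain ⟨hilt, _, hmin⟩ := List.findIdx?_eq_some_iff_getElem.mp hfi
    refine ⟨i, ?_, rfl⟩
    by_contra h
    exact hmin j (by omega) (decide_eq_true hvj)

-- B's min over hits = the index of A's first intersecting group
lemma pvMinHits (cycle : List Int) (groups : List (PySem.Set Int)) (owner : PySem.Dict Int Int)
    (hInv : pvInv groups owner) :
    PySem.List.min? (cycle.filterMap (fun v => owner.get? v)) (fun x => x) =
      (groups.findIdx? (pvHit cycle)).map Int.ofNat := by
  have hmem : ∀ y : Int, y ∈ cycle.filterMap (fun v => owner.get? v) ↔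
      ∃ v ∈ cycle, ∃ i, pvFirstIdx? groups v = some i ∧ y = Int.ofNat i := by
    intro y
    rw [List.mem_filterMap]
    constructor
    · rintro ⟨v, hv, hy⟩
      rw [hInv v] at hy
      cases hfi : pvFirstIdx? groups v with
      | none => rw [hfi] at hy; simp at hy
      | some i =>
        rw [hfi] at hy
        exact ⟨v, hv, i, hfi, (Option.some_inj.mp hy).symm⟩
    · rintro ⟨v, hv, i, hi, rfl⟩
      exact ⟨v, hv, by rw [hInv v, hi]; rfl⟩
  cases hf : groups.findIdx? (pvHit cycle) with
  | none =>
    rw [Option.map_none, PySem.List.min?_eq_none_iff, List.filterMap_eq_nil_iff]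
    intro v hv
    rw [hInv v]
    cases hfi : pvFirstIdx? groups v with
    | none => rfl
    | some i =>
      obtain ⟨hlt, hpi, -⟩ := List.findIdx?_eq_some_iff_getElem.mp hfi
      have hfalse := List.findIdx?_eq_none_iff.mp hf _ (List.getElem_mem hlt)
      rw [pvHit, List.any_eq_false] at hfalse
      exact absurd hpi (hfalse v hv)
  | some j =>
    obtain ⟨hjlt, hpj, hjmin⟩ := List.findIdx?_eq_some_iff_getElem.mp hf
    -- every hit index is ≥ j …
    have hge : ∀ v ∈ cycle, ∀ i, pvFirstIdx? groups v = some i → j ≤ i := by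
      intro v hv i hi
      obtain ⟨hilt, hpi, -⟩ := List.findIdx?_eq_some_iff_getElem.mp hi
      by_contra h
      exact hjmin i (by omega) (by rw [pvHit, List.any_eq_true]; exact ⟨v, hv, hpi⟩)
    -- … and j itself is a hit
    have hjhit : (Int.ofNat j) ∈ cycle.filterMap (fun v => owner.get? v) := by
      rw [pvHit, List.any_eq_true] at hpj
      obtain ⟨v, hv, hvg⟩ := hpj
      obtain ⟨i, hij, hi⟩ := pvFirstIdx_of_mem groups v j hjlt (of_decide_eq_true hvg)
      have : i = j := le_antisymm hij (hge v hv i hi)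
      exact (hmem _).mpr ⟨v, hv, i, hi, by rw [this]⟩
    have hne : cycle.filterMap (fun v => owner.get? v) ≠ [] :=
      fun h => by rw [h] at hjhit; exact absurd hjhit (List.not_mem_nil)
    have hsome : PySem.List.min? (cycle.filterMap (fun v => owner.get? v))
        (fun x : Int => x) ≠ none :=
      fun h => hne ((PySem.List.min?_eq_none_iff _ _).mp h)
    obtain ⟨m, hm⟩ := Option.ne_none_iff_exists'.mp hsome
    have h1 : m ≤ Int.ofNat j := PySem.List.min?_isMin hm _ hjhit
    have h2 : Int.ofNat j ≤ m := by
      obtain ⟨v, hv, i, hi, hmi⟩ := (hmem m).mp (PySem.List.min?_mem hm)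
      rw [hmi]
      exact Int.ofNat_le.mpr (hge v hv i hi)
    rw [hm, le_antisymm h1 h2]
    rfl

-- one step: the two states stay in lockstep and the invariant is preserved
lemma pvStep (groups : List (PySem.Set Int)) (owner : PySem.Dict Int Int) (cycle : List Int)
    (hInv : pvInv groups owner) :
    (pvStepB (groups, owner) cycle).1 =
        (let r := pvInsertA cycle groups
         if r.2 then r.1 else r.1 ++ [PySem.Set.ofList cycle]) ∧
      pvInv (pvStepB (groups, owner) cycle).1 (pvStepB (groups, owner) cycle).2 := by
  rw [pvStepB, pvInsertA_eq, pvMinHits cycle groups owner hInv]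
  cases hf : groups.findIdx? (pvHit cycle) with
  | some j =>
    obtain ⟨hjlt, hpj, hjmin⟩ := List.findIdx?_eq_some_iff_getElem.mp hf
    have htn : (Int.ofNat j).toNat = j := rfl
    simp only [Option.map_some, htn]
    refine ⟨by simp, ?_⟩
    intro v
    rw [pvOwner_get]
    by_cases hv : v ∈ cycle
    · rw [if_pos hv]
      suffices h : pvFirstIdx? (groups.modify j (fun s => PySem.Set.update s cycle)) v
          = some j by rw [h]; rfl
      apply List.findIdx?_eq_some_iff_getElem.mpr
      refine ⟨by rw [List.length_modify]; exact hjlt, ?_, ?_⟩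
      · rw [List.getElem_modify, if_pos rfl]
        exact decide_eq_true ((PySem.Set.mem_update _ _ _).mpr (Or.inr hv))
      · intro k hk
        rw [List.getElem_modify, if_neg (by omega), Bool.not_eq_true]
        have hkf := eq_false_of_ne_true (hjmin k hk)
        rw [pvHit, List.any_eq_false] at hkf
        exact eq_false_of_ne_true (hkf v hv)
    · rw [if_neg hv, hInv v]
      suffices h : pvFirstIdx? (groups.modify j (fun s => PySem.Set.update s cycle)) v
          = pvFirstIdx? groups v by rw [h]
      rw [pvFirstIdx?, pvFirstIdx?]
      refine pvFindIdx?_ext (List.length_modify ..) ?_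
      intro k hk
      rw [List.getElem_modify]
      by_cases hjk : j = k
      · rw [if_pos hjk, Bool.eq_iff_iff, decide_eq_true_eq, decide_eq_true_eq,
            PySem.Set.mem_update]
        exact ⟨fun h => h.resolve_right hv, Or.inl⟩
      · rw [if_neg hjk]
  | none =>
    simp only [Option.map_none]
    refine ⟨by simp, ?_⟩
    intro v
    rw [pvOwner_get]
    have hnone : ∀ w ∈ cycle, ∀ g ∈ groups, w ∉ g := by
      intro w hw g hg hwg
      have := List.findIdx?_eq_none_iff.mp hf g hg
      rw [pvHit, List.any_eq_false] at this
      exact absurd (decide_eq_true hwg) (this w hw)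
    by_cases hv : v ∈ cycle
    · rw [if_pos hv]
      suffices h : pvFirstIdx? (groups ++ [PySem.Set.ofList cycle]) v
          = some groups.length by rw [h]; rfl
      rw [pvFirstIdx?, List.findIdx?_append]
      have h1 : groups.findIdx? (fun g => decide (v ∈ g)) = none := by
        rw [List.findIdx?_eq_none_iff]
        intro g hg
        exact decide_eq_false (hnone v hv g hg)
      rw [h1, List.findIdx?_cons]
      simp [PySem.Set.mem_ofList, hv]
    · rw [if_neg hv, hInv v]
      suffices h : pvFirstIdx? (groups ++ [PySem.Set.ofList cycle]) v
          = pvFirstIdx? groups v by rw [h]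
      rw [pvFirstIdx?, pvFirstIdx?, List.findIdx?_append]
      have h2 : List.findIdx? (fun g => decide (v ∈ g)) [PySem.Set.ofList cycle] = none := by
        simp [List.findIdx?_cons, PySem.Set.mem_ofList, hv]
      rw [h2]
      cases groups.findIdx? (fun g => decide (v ∈ g)) <;> rfl

-- the two folds stay equal from any invariant-linked pair of states
lemma pvFold (cycles : List (List Int)) (groups : List (PySem.Set Int)) (owner : PySem.Dict Int Int)
    (hInv : pvInv groups owner) :
    (cycles.foldl pvStepB (groups, owner)).1 =
      cycles.foldl (fun cycle_groups cycle =>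
        let r := pvInsertA cycle cycle_groups
        if r.2 then r.1 else r.1 ++ [PySem.Set.ofList cycle]) groups := by
  induction cycles generalizing groups owner with
  | nil => rfl
  | cons c cs ih =>
    obtain ⟨h1, h2⟩ := pvStep groups owner c hInv
    rw [List.foldl_cons, List.foldl_cons,
        show pvStepB (groups, owner) c
          = ((pvStepB (groups, owner) c).1, (pvStepB (groups, owner) c).2) from rfl,
        ih _ _ h2, h1]

-- ===== VERDICT (by name: the statement is the Claim_ definition above) =====
theorem group_cycles_spec : Claim_equal_group_cycles := by
  intro cycles _
  unfold Spec_group_cycles group_cycles group_cycles_alt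
  rw [pvFold cycles [] PySem.Dict.empty (fun v => rfl)]
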